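-- pv_equiv track=rewrite | github.com/JordiCan/hybrid-keyboard-optimizer | genetic_algorithm.py | fix_duplicates
-- ===== SOURCE A (Python) =====
-- def fix_duplicates(child, parent1, parent2):
--     """
--     Fix duplicate characters in child by replacing with missing ones
--     """
--     letters = ['a', 'b', 'c', 'd', 'e', 'f', 'g', 'h', 'i', 'j', 'k', 'l', 'm', 'n', 'o', 'p', 'q', 'r', 's', 't', 'u', 'v', 'w', 'x', 'y', 'z', ',', '.', ';', "'"]
--
--     seen = set()
--     duplicates = []
--
--     for i, char in enumerate(child):
--         if char in seen:
--             duplicates.append(i)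
--         else:
--             seen.add(char)
--
--     missing = [char for char in letters if char not in seen]
--
--     for i, missing_char in zip(duplicates, missing):
--         child[i] = missing_char
--
--     return child
-- ===== SOURCE B (Python) =====
-- def fix_duplicates(child, parent1, parent2):
--     """
--     Fix duplicate characters in child by replacing with missing ones
--     (single pass: detection and replacement merged; mutates child like A)
--     """
--     letters = ['a', 'b', 'c', 'd', 'e', 'f', 'g', 'h', 'i', 'j', 'k', 'l', 'm', 'n', 'o', 'p', 'q', 'r', 's', 't', 'u', 'v', 'w', 'x', 'y', 'z', ',', '.', ';', "'"]
--     used = set(child)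
--     missing = [c for c in letters if c not in used]
--     seen = set()
--     out = []
--     for char in child:
--         if char in seen and missing:
--             out.append(missing[0])
--             missing = missing[1:]
--         else:
--             seen.add(char)
--             out.append(char)
--     child[:] = out
--     return child
-- ===== Notes on version B (the rewrite author's own statement) =====
-- stated objective: alternative
-- what changed: B computes the missing letters up front from set(child) and does a single merged pass that detects each duplicate and replaces it immediately, instead of A's separate duplicate-index list plus a second zip loop of assignments.
import Mathlib
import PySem

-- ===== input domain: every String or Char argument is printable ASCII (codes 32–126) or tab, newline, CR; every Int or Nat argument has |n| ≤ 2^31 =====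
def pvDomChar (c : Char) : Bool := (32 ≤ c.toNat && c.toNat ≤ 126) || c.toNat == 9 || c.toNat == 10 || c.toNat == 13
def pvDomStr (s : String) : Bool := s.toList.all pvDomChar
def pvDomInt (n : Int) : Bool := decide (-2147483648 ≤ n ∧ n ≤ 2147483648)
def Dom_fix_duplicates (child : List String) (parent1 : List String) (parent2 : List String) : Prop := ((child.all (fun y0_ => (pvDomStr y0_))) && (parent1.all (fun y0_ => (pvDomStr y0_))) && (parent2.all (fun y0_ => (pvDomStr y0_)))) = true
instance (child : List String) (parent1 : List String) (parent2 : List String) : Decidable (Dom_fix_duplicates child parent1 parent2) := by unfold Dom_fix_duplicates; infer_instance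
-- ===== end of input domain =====

-- B merges duplicate detection and replacement into one pass over child (missing letters computed up front); return-value equivalence (Python A and B both mutate `child` in place the same way).


-- the module-level letters literal, shared by both Pythons
def pvLetters : List String := ["a","b","c","d","e","f","g","h","i","j","k","l","m","n","o","p","q","r","s","t","u","v","w","x","y","z",",",".",";","'"]

-- ===== PORT A =====
-- one step of A's detection loop over enumerate(child)
def pvStepA (p : PySem.Set String × List Int) (ic : Int × String) : PySem.Set String × List Int :=
  if PySem.Set.contains p.1 ic.2 then (p.1, p.2 ++ [ic.1]) else (PySem.Set.add p.1 ic.2, p.2)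

def fix_duplicates (child : List String) (parent1 : List String) (parent2 : List String) : List String :=
  let sd := (PySem.List.enumerate child 0).foldl pvStepA (PySem.Set.empty, [])
  let missing := pvLetters.filter (fun c => !(PySem.Set.contains sd.1 c))
  -- zip truncates at the shorter list, like Python's zip; child[i] = m is pySetD (i from enumerate, always in range, so Python never raises)
  (sd.2.zip missing).foldl (fun c im => PySem.List.pySetD c im.1 im.2) child

-- ===== PORT B =====
-- B's single pass: `missing[0]` / `missing = missing[1:]` under the nonemptiness guard are headD / tail
def pvGoB : List String → PySem.Set String → List String → List String
  | [], _, _ => []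
  | c :: rest, seen, missing =>
    if PySem.Set.contains seen c && !missing.isEmpty then
      missing.headD "" :: pvGoB rest seen missing.tail
    else
      c :: pvGoB rest (PySem.Set.add seen c) missing

def fix_duplicates_alt (child : List String) (parent1 : List String) (parent2 : List String) : List String :=
  let used := PySem.Set.ofList child
  let missing := pvLetters.filter (fun c => !(PySem.Set.contains used c))
  pvGoB child PySem.Set.empty missing

-- ===== PRECONDITION & SPEC =====
def Spec_fix_duplicates (child : List String) (parent1 : List String) (parent2 : List String) (out : List String) : Prop := out = fix_duplicates_alt child parent1 parent2
instance (child : List String) (parent1 : List String) (parent2 : List String) (out : List String) : Decidable (Spec_fix_duplicates child parent1 parent2 out) := by unfold Spec_fix_duplicates; infer_instance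

-- ===== CLAIM (what is proved, stated in full; the proofs are below) =====
def Claim_equal_fix_duplicates : Prop := ∀ (child : List String) (parent1 : List String) (parent2 : List String), Dom_fix_duplicates child parent1 parent2 → Spec_fix_duplicates child parent1 parent2 (fix_duplicates child parent1 parent2)

-- ===== LEMMAS AND PROOFS =====

-- the duplicates accumulator is only appended to
theorem pvFoldA_acc (l : List (Int × String)) (s : PySem.Set String) (d : List Int) :
    l.foldl pvStepA (s, d) = ((l.foldl pvStepA (s, [])).1, d ++ (l.foldl pvStepA (s, [])).2) := by
  induction l generalizing s d with
  | nil => simp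
  | cons ic t ih =>
    simp only [List.foldl_cons, pvStepA]
    by_cases h : PySem.Set.contains s ic.2
    · simp only [h, if_pos]
      rw [ih s (d ++ [ic.1]), ih s ([] ++ [ic.1])]
      simp
    · simp only [h]
      exact ih _ d

-- the seen component of A's detection loop is a fold of Set.add over the characters
theorem pvFoldA_fst (l : List (Int × String)) (s : PySem.Set String) (d : List Int) :
    (l.foldl pvStepA (s, d)).1 = (l.map (·.2)).foldl PySem.Set.add s := by
  induction l generalizing s d with
  | nil => simp
  | cons ic t ih =>
    simp only [List.foldl_cons, List.map_cons, pvStepA]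
    by_cases h : PySem.Set.contains s ic.2
    · simp only [h, if_pos]
      rw [ih]
      have : PySem.Set.add s ic.2 = s := PySem.Set.add_of_mem (by simpa using h)
      rw [this]
    · simp only [h]
      exact ih _ _

-- with no missing letters left, B's pass copies the rest unchanged
theorem pvGoB_nil_missing (rest : List String) (s : PySem.Set String) :
    pvGoB rest s [] = rest := by
  induction rest generalizing s with
  | nil => rfl
  | cons c t ih => simp [pvGoB, ih]

-- main invariant: A's assignment loop over the remaining duplicates equals B's merged pass
theorem pvMain (rest : List String) (pref : List String) (s : PySem.Set String) (ms : List String) :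
    (((PySem.List.enumerate rest (pref.length : Int)).foldl pvStepA (s, [])).2.zip ms).foldl
        (fun c im => PySem.List.pySetD c im.1 im.2) (pref ++ rest)
      = pref ++ pvGoB rest s ms := by
  induction rest generalizing pref s ms with
  | nil => simp [PySem.List.enumerate_nil, pvGoB]
  | cons c r ih =>
    rw [PySem.List.enumerate_cons]
    simp only [List.foldl_cons, pvStepA]
    by_cases h : PySem.Set.contains s c
    · simp only [h, if_pos]
      rw [pvFoldA_acc]
      cases ms with
      | nil =>
        have hrhs : pvGoB (c :: r) s [] = c :: pvGoB r (PySem.Set.add s c) [] := by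
          simp only [pvGoB]; rw [if_neg (by simp)]
        rw [hrhs, pvGoB_nil_missing]
        simp
      | cons m ms' =>
        simp only [List.cons_append, List.zip_cons_cons, List.nil_append, List.foldl_cons]
        have hset : PySem.List.pySetD (pref ++ c :: r) (pref.length : Int) m = pref ++ m :: r := by
          have hlt : pref.length < (pref ++ c :: r).length := by simp
          simp [PySem.List.pySetD, PySem.List.pySet?_natCast _ _ _ hlt]
        rw [hset]
        have hlen : ((pref.length : Int) + 1) = (((pref ++ [m]).length : Nat) : Int) := by
          simp
        have := ih (pref ++ [m]) s ms'
        rw [List.append_assoc] at this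
        simp only [List.singleton_append] at this
        rw [hlen, this]
        have hrhs : pvGoB (c :: r) s (m :: ms') = m :: pvGoB r s ms' := by
          simp only [pvGoB]; rw [if_pos (by simpa using h)]; rfl
        rw [hrhs]
        simp
    · rw [if_neg h]
      have hlen : ((pref.length : Int) + 1) = (((pref ++ [c]).length : Nat) : Int) := by
        simp
      have := ih (pref ++ [c]) (PySem.Set.add s c) ms
      rw [List.append_assoc] at this
      simp only [List.singleton_append] at this
      rw [hlen, this]
      have hrhs : pvGoB (c :: r) s ms = c :: pvGoB r (PySem.Set.add s c) ms := by
        rw [Bool.not_eq_true] at h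
        simp only [pvGoB]; rw [if_neg (by simp only [h, Bool.false_and]; decide)]
      rw [hrhs]
      simp

-- ===== VERDICT (by name: the statement is the Claim_ definition above) =====
theorem fix_duplicates_spec : Claim_equal_fix_duplicates := by
  intro child parent1 parent2 _
  show fix_duplicates child parent1 parent2 = fix_duplicates_alt child parent1 parent2
  simp only [fix_duplicates, fix_duplicates_alt]
  have hfst : ((PySem.List.enumerate child 0).foldl pvStepA (PySem.Set.empty, [])).1
      = PySem.Set.ofList child := by
    rw [pvFoldA_fst, PySem.List.map_snd_enumerate, PySem.Set.ofList_eq_foldl]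
    rfl
  rw [hfst]
  have h0 : (0 : Int) = ((([] : List String).length : Nat) : Int) := by simp
  rw [h0]
  have := pvMain child [] PySem.Set.empty
      (pvLetters.filter (fun c => !(PySem.Set.contains (PySem.Set.ofList child) c)))
  simpa using this
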